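-- pv_equiv track=rewrite | github.com/KazooBoye/UnderwaterObjectClassification | analyze_yolo_model.py | _calculate_csp_stage_params
-- ===== SOURCE A (Python) =====
-- def _calculate_csp_stage_params(in_ch: int, out_ch: int, num_blocks: int) -> int:
--     """Calculate parameters for one CSP stage"""
--     # Initial conv
--     initial_conv = (in_ch * out_ch * 3 * 3) + (out_ch * 4)  # conv + bn
--
--     # CSP blocks
--     block_params = 0
--     for _ in range(num_blocks):
--         # Conv 1x1 (out_ch -> out_ch//2)
--         conv1 = (out_ch * (out_ch//2) * 1 * 1) + ((out_ch//2) * 4)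
--         # Conv 3x3 (out_ch//2 -> out_ch//2)
--         conv2 = ((out_ch//2) * (out_ch//2) * 3 * 3) + ((out_ch//2) * 4)
--         # Conv 1x1 (out_ch//2 -> out_ch)
--         conv3 = ((out_ch//2) * out_ch * 1 * 1) + (out_ch * 4)
--
--         block_params += conv1 + conv2 + conv3
--
--     return initial_conv + block_params
-- ===== SOURCE B (Python) =====
-- def _calculate_csp_stage_params(in_ch: int, out_ch: int, num_blocks: int) -> int:
--     """Closed form: each CSP block contributes the same count, so multiply."""
--     half = out_ch // 2
--     per_block = (out_ch * half + half * 4) + (half * half * 9 + half * 4) + (half * out_ch + out_ch * 4)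
--     return in_ch * out_ch * 9 + out_ch * 4 + per_block * max(num_blocks, 0)
-- ===== Notes on version B (the rewrite author's own statement) =====
-- stated objective: faster
-- what changed: The per-block parameter count is loop-invariant, so B computes it once and multiplies by max(num_blocks, 0) instead of looping num_blocks times.
import Mathlib
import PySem

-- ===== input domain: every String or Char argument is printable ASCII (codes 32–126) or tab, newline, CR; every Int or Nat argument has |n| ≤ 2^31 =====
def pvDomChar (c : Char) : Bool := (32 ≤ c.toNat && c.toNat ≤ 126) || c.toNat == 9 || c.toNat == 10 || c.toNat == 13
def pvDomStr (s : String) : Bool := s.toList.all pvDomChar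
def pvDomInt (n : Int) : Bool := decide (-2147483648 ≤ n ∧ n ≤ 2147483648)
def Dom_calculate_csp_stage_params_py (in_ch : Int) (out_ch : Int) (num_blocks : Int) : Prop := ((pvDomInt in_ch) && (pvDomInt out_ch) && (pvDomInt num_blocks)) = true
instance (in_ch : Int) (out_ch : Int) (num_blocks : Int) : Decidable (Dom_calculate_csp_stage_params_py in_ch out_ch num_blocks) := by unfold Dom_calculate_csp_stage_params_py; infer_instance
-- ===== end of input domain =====

-- B replaces the per-block loop by one closed-form multiplication (the loop body is loop-invariant): O(num_blocks) → O(1).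

-- ===== PORT A =====
def calculate_csp_stage_params_py (in_ch : Int) (out_ch : Int) (num_blocks : Int) : Int :=
  let initial_conv := (in_ch * out_ch * 3 * 3) + (out_ch * 4)
  let block_params :=
    (PySem.List.pyRange 0 num_blocks 1).foldl
      (fun block_params _ =>
        let conv1 := (out_ch * (PySem.Int.floordiv out_ch 2) * 1 * 1) + ((PySem.Int.floordiv out_ch 2) * 4)
        let conv2 := ((PySem.Int.floordiv out_ch 2) * (PySem.Int.floordiv out_ch 2) * 3 * 3) + ((PySem.Int.floordiv out_ch 2) * 4)
        let conv3 := ((PySem.Int.floordiv out_ch 2) * out_ch * 1 * 1) + (out_ch * 4)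
        block_params + (conv1 + conv2 + conv3)) 0
  initial_conv + block_params

-- ===== PORT B =====
def calculate_csp_stage_params_py_alt (in_ch : Int) (out_ch : Int) (num_blocks : Int) : Int :=
  let half := PySem.Int.floordiv out_ch 2
  let per_block := (out_ch * half + half * 4) + (half * half * 9 + half * 4) + (half * out_ch + out_ch * 4)
  in_ch * out_ch * 9 + out_ch * 4 + per_block * max num_blocks 0

-- ===== PRECONDITION & SPEC =====
def Spec_calculate_csp_stage_params_py (in_ch : Int) (out_ch : Int) (num_blocks : Int) (out : Int) : Prop := out = calculate_csp_stage_params_py_alt in_ch out_ch num_blocks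
instance (in_ch : Int) (out_ch : Int) (num_blocks : Int) (out : Int) : Decidable (Spec_calculate_csp_stage_params_py in_ch out_ch num_blocks out) := by unfold Spec_calculate_csp_stage_params_py; infer_instance

-- ===== CLAIM (what is proved, stated in full; the proofs are below) =====
def Claim_equal_calculate_csp_stage_params_py : Prop := ∀ (in_ch : Int) (out_ch : Int) (num_blocks : Int), Dom_calculate_csp_stage_params_py in_ch out_ch num_blocks → Spec_calculate_csp_stage_params_py in_ch out_ch num_blocks (calculate_csp_stage_params_py in_ch out_ch num_blocks)

-- ===== LEMMAS AND PROOFS =====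

-- folding 'add the constant c' over any list = init + c * length
theorem foldl_add_const (c : Int) (l : List Int) (init : Int) :
    l.foldl (fun acc _ => acc + c) init = init + c * l.length := by
  induction l generalizing init with
  | nil => simp
  | cons x xs ih => simp [List.foldl, ih]; ring

-- ===== VERDICT (by name: the statement is the Claim_ definition above) =====
theorem calculate_csp_stage_params_py_spec : Claim_equal_calculate_csp_stage_params_py := by
  intro in_ch out_ch num_blocks _
  unfold Spec_calculate_csp_stage_params_py calculate_csp_stage_params_py calculate_csp_stage_params_py_alt
  rw [foldl_add_const]
  rw [PySem.List.length_pyRange_one]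
  rw [show ((num_blocks - 0).toNat : Int) = max num_blocks 0 by omega]
  ring
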